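-- pv_equiv track=rewrite | github.com/Sunny-Qin-0314/CRF-LOOK-DETECTION | new/onset_evaluation.py | onset_evaluation
-- ===== SOURCE A (Python) =====
-- from bisect import bisect_left
--
-- def take_closest(myList, myNumber):
--     """
--     # Assumes myList is sorted. Returns closest value to myNumber.
--
--     If two numbers are equally close, return the smallest number.
--     """
--     pos = bisect_left(myList, myNumber)
--     if pos == 0:
--         return myList[0]
--     if pos == len(myList):
--         return myList[-1]
--     before = myList[pos - 1]
--     after = myList[pos]
--     if after - myNumber < myNumber - before:
--        return after
--     else:
--        return before
--
-- def onset_evaluation(index_gt, index_pred, weight):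
--     onset = 0
--     if len(index_gt) == len(index_pred):
--         for i in range(len(index_gt)):
--             onset = onset + abs(index_pred[i] - index_gt[i])
--
--     elif len(index_gt) < len(index_pred):
--         for i in range(len(index_gt)):
--             pred_closest = take_closest(index_pred,index_gt[i])
--             onset = onset + abs(pred_closest - index_gt[i])
--
--     else:
--         for i in range(len(index_pred)):
--             gt_closest = take_closest(index_gt,index_pred[i])
--             onset = onset + abs(gt_closest - index_pred[i])
--
--     evaluation_result = abs(len(index_gt) - len(index_pred)) + weight * onset
--
--     return evaluation_result
-- ===== SOURCE B (Python) =====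
-- def _bisect(a, x, lo, hi):
--     """Recursive bisect_left on a[lo:hi]."""
--     if lo >= hi:
--         return lo
--     mid = (lo + hi) // 2
--     if a[mid] < x:
--         return _bisect(a, x, mid + 1, hi)
--     return _bisect(a, x, lo, mid)
--
--
-- def _closest_dist(longer, x):
--     """Distance from x to the bisect-chosen neighbour in `longer` (indices clamped)."""
--     pos = _bisect(longer, x, 0, len(longer))
--     before = longer[max(pos - 1, 0)]
--     after = longer[min(pos, len(longer) - 1)]
--     c = after if after - x < x - before else before
--     return abs(c - x)
--
--
-- def onset_evaluation(index_gt, index_pred, weight):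
--     if len(index_gt) == len(index_pred):
--         onset = sum(abs(p - g) for g, p in zip(index_gt, index_pred))
--     else:
--         short, longer = (index_gt, index_pred) if len(index_gt) < len(index_pred) else (index_pred, index_gt)
--         onset = sum(_closest_dist(longer, x) for x in short)
--     return abs(len(index_gt) - len(index_pred)) + weight * onset
-- ===== Notes on version B (the rewrite author's own statement) =====
-- stated objective: simpler
-- what changed: B collapses A's three index-driven loops and take_closest's four-way early-return chain into a symmetric two-branch form: a zip/sum for equal lengths, and for unequal lengths a single map over the shorter list using a recursive bisect with arithmetically clamped neighbour indices (no boundary branches, no helper returning a chosen value).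
import Mathlib
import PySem

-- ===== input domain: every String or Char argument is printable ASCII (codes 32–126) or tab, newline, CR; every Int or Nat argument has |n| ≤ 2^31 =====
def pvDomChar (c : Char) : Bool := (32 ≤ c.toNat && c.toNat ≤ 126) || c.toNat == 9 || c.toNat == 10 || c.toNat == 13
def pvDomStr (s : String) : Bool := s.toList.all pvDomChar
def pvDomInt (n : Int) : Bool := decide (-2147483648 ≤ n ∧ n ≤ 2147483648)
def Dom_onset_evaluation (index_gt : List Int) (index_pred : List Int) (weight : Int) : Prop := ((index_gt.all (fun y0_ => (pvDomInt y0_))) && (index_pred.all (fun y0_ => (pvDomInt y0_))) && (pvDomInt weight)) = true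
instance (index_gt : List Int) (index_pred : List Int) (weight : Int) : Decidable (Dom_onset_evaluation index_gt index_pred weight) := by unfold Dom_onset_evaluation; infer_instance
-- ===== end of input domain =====

-- B replaces A's three index loops and take_closest's early-return chain by a symmetric
-- two-branch form: zip/sum for equal lengths, and a map over the shorter list with a
-- recursive bisect plus clamped neighbour indices for unequal lengths (objective: simpler).

-- Python abs on Int
def pabs (z : Int) : Int := if z < 0 then -z else z

-- ===== PORT A =====
-- bisect.bisect_left (CPython's while-loop, as recursion on hi - lo); in-range indices, getD used for totality
def bisectLeftA (a : List Int) (x : Int) (lo hi : Nat) : Nat :=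
  if lo < hi then
    let mid := (lo + hi) / 2
    if a.getD mid 0 < x then bisectLeftA a x (mid + 1) hi
    else bisectLeftA a x lo mid
  else lo
termination_by hi - lo
decreasing_by all_goals omega

def takeClosest (l : List Int) (x : Int) : Int :=
  let pos := bisectLeftA l x 0 l.length
  if pos = 0 then l.getD 0 0
  else if pos = l.length then l.getD (l.length - 1) 0   -- myList[-1]
  else
    let before := l.getD (pos - 1) 0
    let after := l.getD pos 0
    if after - x < x - before then after else before

def onset_evaluation (index_gt : List Int) (index_pred : List Int) (weight : Int) : Int :=
  let onset : Int :=
    if index_gt.length = index_pred.length then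
      (List.range index_gt.length).foldl
        (fun o i => o + pabs (index_pred.getD i 0 - index_gt.getD i 0)) 0
    else if index_gt.length < index_pred.length then
      (List.range index_gt.length).foldl
        (fun o i => o + pabs (takeClosest index_pred (index_gt.getD i 0) - index_gt.getD i 0)) 0
    else
      (List.range index_pred.length).foldl
        (fun o i => o + pabs (takeClosest index_gt (index_pred.getD i 0) - index_pred.getD i 0)) 0
  pabs ((index_gt.length : Int) - (index_pred.length : Int)) + weight * onset

-- ===== PORT B =====
-- recursive bisect_left on a[lo:hi]
def bisectRecB (a : List Int) (x : Int) (lo hi : Nat) : Nat :=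
  if lo ≥ hi then lo
  else
    let mid := (lo + hi) / 2
    if a.getD mid 0 < x then bisectRecB a x (mid + 1) hi
    else bisectRecB a x lo mid
termination_by hi - lo
decreasing_by all_goals omega

-- max (pos - 1) 0 in Python; on Nat, pos - 1 already truncates at 0
def closestDist (longer : List Int) (x : Int) : Int :=
  let pos := bisectRecB longer x 0 longer.length
  let before := longer.getD (pos - 1) 0
  let after := longer.getD (min pos (longer.length - 1)) 0
  let c := if after - x < x - before then after else before
  pabs (c - x)

def onset_evaluation_alt (index_gt : List Int) (index_pred : List Int) (weight : Int) : Int :=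
  let onset : Int :=
    if index_gt.length = index_pred.length then
      ((index_gt.zip index_pred).map (fun gp => pabs (gp.2 - gp.1))).sum
    else
      let sl := if index_gt.length < index_pred.length then (index_gt, index_pred)
                else (index_pred, index_gt)
      (sl.1.map (fun x => closestDist sl.2 x)).sum
  pabs ((index_gt.length : Int) - (index_pred.length : Int)) + weight * onset

-- ===== PRECONDITION & SPEC =====
def Spec_onset_evaluation (index_gt : List Int) (index_pred : List Int) (weight : Int) (out : Int) : Prop := out = onset_evaluation_alt index_gt index_pred weight
instance (index_gt : List Int) (index_pred : List Int) (weight : Int) (out : Int) : Decidable (Spec_onset_evaluation index_gt index_pred weight out) := by unfold Spec_onset_evaluation; infer_instance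

-- ===== CLAIM (what is proved, stated in full; the proofs are below) =====
def Claim_equal_onset_evaluation : Prop := ∀ (index_gt : List Int) (index_pred : List Int) (weight : Int), Dom_onset_evaluation index_gt index_pred weight → Spec_onset_evaluation index_gt index_pred weight (onset_evaluation index_gt index_pred weight)

-- ===== LEMMAS AND PROOFS =====

theorem bisect_eq_aux (a : List Int) (x : Int) (n : Nat) :
    ∀ lo hi, hi - lo ≤ n → bisectRecB a x lo hi = bisectLeftA a x lo hi := by
  induction n with
  | zero =>
    intro lo hi h
    rw [bisectRecB, bisectLeftA]
    have h1 : lo ≥ hi := by omega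
    have h2 : ¬ lo < hi := by omega
    simp [h1, h2]
  | succ n ih =>
    intro lo hi h
    rw [bisectRecB, bisectLeftA]
    by_cases hlt : lo < hi
    · have h1 : ¬ lo ≥ hi := by omega
      simp only [if_neg h1, if_pos hlt]
      by_cases hm : a.getD ((lo + hi) / 2) 0 < x
      · simp only [if_pos hm]
        exact ih _ _ (by omega)
      · simp only [if_neg hm]
        exact ih _ _ (by omega)
    · have h1 : lo ≥ hi := by omega
      simp [h1, hlt]

theorem bisect_eq (a : List Int) (x : Int) (lo hi : Nat) :
    bisectRecB a x lo hi = bisectLeftA a x lo hi :=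
  bisect_eq_aux a x (hi - lo) lo hi le_rfl

theorem bisect_le_aux (a : List Int) (x : Int) (n : Nat) :
    ∀ lo hi, hi - lo ≤ n → lo ≤ hi →
      lo ≤ bisectLeftA a x lo hi ∧ bisectLeftA a x lo hi ≤ hi := by
  induction n with
  | zero =>
    intro lo hi h hle
    rw [bisectLeftA]
    have h2 : ¬ lo < hi := by omega
    simp [h2]; omega
  | succ n ih =>
    intro lo hi h hle
    rw [bisectLeftA]
    by_cases hlt : lo < hi
    · simp only [if_pos hlt]
      by_cases hm : a.getD ((lo + hi) / 2) 0 < x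
      · simp only [if_pos hm]
        have := ih ((lo + hi) / 2 + 1) hi (by omega) (by omega)
        omega
      · simp only [if_neg hm]
        have := ih lo ((lo + hi) / 2) (by omega) (by omega)
        omega
    · simp [hlt]; omega

theorem closestDist_eq (l : List Int) (x : Int) (hl : l ≠ []) :
    closestDist l x = pabs (takeClosest l x - x) := by
  have hlen : 0 < l.length := List.length_pos_iff.mpr hl
  unfold closestDist takeClosest
  rw [bisect_eq]
  have hb := bisect_le_aux l x l.length 0 l.length (by omega) (by omega)
  set p := bisectLeftA l x 0 l.length with hp
  dsimp only
  rcases Nat.eq_zero_or_pos p with h0 | hpos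
  · have hmin : min p (l.length - 1) = 0 := by omega
    simp only [h0]
    simp only [Nat.zero_sub]
    split <;> rfl
  · by_cases hlast : p = l.length
    · have hmin2 : min l.length (l.length - 1) = l.length - 1 := by omega
      simp only [hlast, hmin2, if_neg (show ¬ l.length = 0 by omega), if_true]
      split <;> rfl
    · have hmin : min p (l.length - 1) = p := by omega
      simp only [hmin, if_neg (by omega : ¬ p = 0), if_neg hlast]

theorem foldl_range_getD (l : List Int) (g : Int → Int) (z : Int) :
    (List.range l.length).foldl (fun o i => o + g (l.getD i 0)) z
      = l.foldl (fun o a => o + g a) z := by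
  induction l generalizing z with
  | nil => simp
  | cons a t ih =>
    simp only [List.length_cons, List.range_succ_eq_map, List.foldl_cons, List.foldl_map,
      List.getD_cons_zero, List.getD_cons_succ]
    exact ih (z + g a)

theorem foldl_range_map (l : List Int) (g : Int → Int) :
    (List.range l.length).foldl (fun o i => o + g (l.getD i 0)) 0 = (l.map g).sum := by
  rw [foldl_range_getD, List.sum_eq_foldl, List.foldl_map]

theorem foldl_range_zip_aux (gt pr : List Int) (z : Int) (h : gt.length = pr.length) :
    (List.range gt.length).foldl (fun o i => o + pabs (pr.getD i 0 - gt.getD i 0)) z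
      = z + ((gt.zip pr).map (fun gp => pabs (gp.2 - gp.1))).sum := by
  induction gt generalizing pr z with
  | nil => simp
  | cons a t ih =>
    cases pr with
    | nil => simp at h
    | cons b pt =>
      simp only [List.length_cons, List.range_succ_eq_map, List.foldl_cons, List.foldl_map,
        List.getD_cons_zero, List.getD_cons_succ, List.zip_cons_cons, List.map_cons,
        List.sum_cons]
      rw [ih pt (z + pabs (b - a)) (by simpa using h)]
      ring

theorem foldl_range_zip (gt pr : List Int) (h : gt.length = pr.length) :
    (List.range gt.length).foldl (fun o i => o + pabs (pr.getD i 0 - gt.getD i 0)) 0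
      = ((gt.zip pr).map (fun gp => pabs (gp.2 - gp.1))).sum := by
  rw [foldl_range_zip_aux gt pr 0 h]; ring

-- ===== VERDICT (by name: the statement is the Claim_ definition above) =====
theorem onset_evaluation_spec : Claim_equal_onset_evaluation := by
  intro gt pr w _
  unfold Spec_onset_evaluation onset_evaluation onset_evaluation_alt
  by_cases h1 : gt.length = pr.length
  · rw [if_pos h1, if_pos h1, foldl_range_zip gt pr h1]
  · rw [if_neg h1, if_neg h1]
    by_cases h2 : gt.length < pr.length
    · have hne : pr ≠ [] := by
        intro he; rw [he] at h2; simp at h2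
      rw [if_pos h2, if_pos h2, foldl_range_map gt (fun x => pabs (takeClosest pr x - x))]
      dsimp only
      congr 2
      refine congrArg List.sum (List.map_congr_left ?_)
      intro x _
      exact (closestDist_eq pr x hne).symm
    · have hlt : pr.length < gt.length := by omega
      have hne : gt ≠ [] := by
        intro he; rw [he] at hlt; simp at hlt
      rw [if_neg h2, if_neg h2, foldl_range_map pr (fun x => pabs (takeClosest gt x - x))]
      dsimp only
      congr 2
      refine congrArg List.sum (List.map_congr_left ?_)
      intro x _
      exact (closestDist_eq gt x hne).symm
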